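-- pv_equiv track=rewrite | github.com/vivagarwal/fastapi_nextjs_problems_backend | solution.py | sol_1
-- ===== SOURCE A (Python) =====
-- def sol_1(y: str):
--     nums = list(map(int, y.split()))
--     k=0
--     l = len(nums)
--     for x in range (0,l):
--             if(x ==0 or nums[x]!=nums[x-1]):
--                 nums[k]=nums[x]
--                 k+=1
--     return str(k)
-- ===== SOURCE B (Python) =====
-- def _runs(a, lo, hi):
--     # number of maximal runs of equal values in a[lo:hi), by divide and conquer:
--     # runs(left) + runs(right), minus 1 when one run spans the midpoint
--     if hi - lo <= 1:
--         return hi - lo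
--     mid = (lo + hi) // 2
--     r = _runs(a, lo, mid) + _runs(a, mid, hi)
--     return r - 1 if a[mid - 1] == a[mid] else r
--
-- def sol_1(y: str):
--     nums = [int(t) for t in y.split()]
--     return str(_runs(nums, 0, len(nums)))
-- ===== Notes on version B (the rewrite author's own statement) =====
-- stated objective: alternative
-- what changed: Replaces A's sequential write-pointer compaction loop with a divide-and-conquer recursion: runs(lo,hi) = runs(lo,mid) + runs(mid,hi) minus one when a run crosses the midpoint; no mutation, no left-to-right scan.
import Mathlib
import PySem

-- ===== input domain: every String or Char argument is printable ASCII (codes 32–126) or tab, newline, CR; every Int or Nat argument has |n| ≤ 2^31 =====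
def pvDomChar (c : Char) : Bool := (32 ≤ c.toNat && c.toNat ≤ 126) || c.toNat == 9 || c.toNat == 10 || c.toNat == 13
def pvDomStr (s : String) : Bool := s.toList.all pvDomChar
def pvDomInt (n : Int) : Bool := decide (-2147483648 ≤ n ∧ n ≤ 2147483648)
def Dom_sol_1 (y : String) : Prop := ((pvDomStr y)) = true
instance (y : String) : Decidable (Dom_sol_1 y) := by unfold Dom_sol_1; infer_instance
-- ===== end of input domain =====

-- B replaces A's write-pointer compaction loop by a divide-and-conquer recursion on index
-- ranges (runs(lo,hi) = runs(lo,mid) + runs(mid,hi) - crossing run); same value (alternative).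

-- ===== PORT A =====
-- one step of A's loop body: state is (nums, k), x the range index
def pvStepA (st : List Int × Int) (x : Int) : List Int × Int :=
  if x == 0 || !(PySem.List.pyGetD st.1 x 0 == PySem.List.pyGetD st.1 (x - 1) 0) then
    (PySem.List.pySetD st.1 st.2 (PySem.List.pyGetD st.1 x 0), st.2 + 1)
  else st

def sol_1 (y : String) : String :=
  let nums : List Int := (PySem.Str.split₀ y).map (fun t => (PySem.Int.ofStr? t).getD 0)
  let l : Int := nums.length
  let st := (PySem.List.pyRange 0 l 1).foldl pvStepA (nums, 0)
  PySem.Int.toStr st.2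

-- ===== PORT B =====
-- _runs(a, lo, hi): divide-and-conquer run count; indices are Nat (B only calls lo ≤ hi)
def pvRuns (a : List Int) (lo hi : Nat) : Int :=
  if hi - lo ≤ 1 then ((hi - lo : Nat) : Int)
  else
    let mid := (lo + hi) / 2
    let r := pvRuns a lo mid + pvRuns a mid hi
    if a.getD (mid - 1) 0 == a.getD mid 0 then r - 1 else r
termination_by hi - lo
decreasing_by all_goals omega

def sol_1_alt (y : String) : String :=
  let nums : List Int := (PySem.Str.split₀ y).map (fun t => (PySem.Int.ofStr? t).getD 0)
  PySem.Int.toStr (pvRuns nums 0 nums.length)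

-- ===== PRECONDITION & SPEC =====
-- A raises ValueError when some whitespace-separated token of y is not a valid int literal;
-- Pre_ excludes exactly those inputs.
def Pre_sol_1 (y : String) : Prop :=
  ∀ t ∈ PySem.Str.split₀ y, (PySem.Int.ofStr? t).isSome = true
instance (y : String) : Decidable (Pre_sol_1 y) := by unfold Pre_sol_1; infer_instance
def pvWitness_sol_1 : String := "1 1 2"

def Spec_sol_1 (y : String) (out : String) : Prop := out = sol_1_alt y
instance (y : String) (out : String) : Decidable (Spec_sol_1 y out) := by unfold Spec_sol_1; infer_instance

-- ===== CLAIM (what is proved, stated in full; the proofs are below) =====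
def Claim_equal_sol_1 : Prop := ∀ (y : String), Dom_sol_1 y → Pre_sol_1 y → Spec_sol_1 y (sol_1 y)

-- ===== LEMMAS AND PROOFS =====

-- Proof-side bridge: the number of runs, as a left-to-right recursion (used by BOTH sides'
-- correctness lemmas; neither port computes with it).
def pvGroupsGo (prev : Int) : List Int → Int
  | [] => 0
  | b :: rest => (if b == prev then 0 else 1) + pvGroupsGo b rest

def pvGroups : List Int → Int
  | [] => 0
  | a :: rest => 1 + pvGroupsGo a rest

-- last element of prev :: xs
def pvLastD (prev : Int) : List Int → Int
  | [] => prev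
  | b :: rest => pvLastD b rest

-- Loop invariant for A: processing indices [i, |orig|) with list l agreeing with orig on
-- indices ≥ i-1 and write pointer 0 ≤ k ≤ i adds exactly the number of run starts among the
-- remaining elements (rest, with previous element prev).
theorem pvA_loop (rest : List Int) : ∀ (prev : Int) (orig l : List Int) (i : Nat) (k : Int),
    1 ≤ i →
    orig.drop (i - 1) = prev :: rest →
    l.length = orig.length →
    (∀ j : Nat, i - 1 ≤ j → l.getD j 0 = orig.getD j 0) →
    0 ≤ k → k ≤ (i : Int) →
    ((PySem.List.pyRange (i : Int) (orig.length : Int) 1).foldl pvStepA (l, k)).2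
      = k + pvGroupsGo prev rest := by
  induction rest with
  | nil =>
    intro prev orig l i k hi hdrop hlen hagree hk0 hki
    have hlen' : orig.length = i := by
      have := congrArg List.length hdrop
      simp [List.length_drop] at this
      omega
    rw [hlen', PySem.List.pyRange_one_eq_nil (by omega)]
    simp [pvGroupsGo]
  | cons b rest ih =>
    intro prev orig l i k hi hdrop hlen hagree hk0 hki
    have hlen' : orig.length = i + 1 + rest.length := by
      have := congrArg List.length hdrop
      simp [List.length_drop] at this
      omega
    have hprev : orig.getD (i - 1) 0 = prev := by
      have h0 : (orig.drop (i - 1))[0]? = some prev := by rw [hdrop]; rfl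
      rw [List.getElem?_drop] at h0
      simp [List.getD] at h0 ⊢
      simp [h0]
    have hb : orig.getD i 0 = b := by
      have h1 : (orig.drop (i - 1))[1]? = some b := by rw [hdrop]; rfl
      rw [List.getElem?_drop] at h1
      have : i - 1 + 1 = i := by omega
      rw [this] at h1
      simp [List.getD, h1]
    have hdrop' : orig.drop i = b :: rest := by
      have : orig.drop i = (orig.drop (i - 1)).tail := by
        rw [List.tail_drop]; congr 1; omega
      rw [this, hdrop]; rfl
    rw [PySem.List.pyRange_one_cons (by omega : (i : Int) < (orig.length : Int))]
    rw [List.foldl_cons]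
    -- evaluate one step of A at index i
    have hx0 : ((i : Int) == 0) = false := by
      simp; omega
    have hgi : PySem.List.pyGetD l (i : Int) 0 = b := by
      rw [PySem.List.pyGetD_natCast, hagree i (by omega), hb]
    have hgi1 : PySem.List.pyGetD l ((i : Int) - 1) 0 = prev := by
      have : (i : Int) - 1 = ((i - 1 : Nat) : Int) := by omega
      rw [this, PySem.List.pyGetD_natCast, hagree (i - 1) (by omega), hprev]
    have hstep : pvStepA (l, k) (i : Int)
        = if b == prev then (l, k) else (l.set k.toNat b, k + 1) := by
      unfold pvStepA
      simp only [hx0, hgi, hgi1, Bool.false_or]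
      by_cases hbp : b = prev
      · simp [hbp]
      · have : (b == prev) = false := by simp [hbp]
        simp [this, PySem.List.pySetD_of_nonneg _ _ hk0]
    rw [hstep]
    by_cases hbp : b = prev
    · simp only [hbp, beq_self_eq_true, if_true]
      have hstep' := ih prev orig l (i + 1) k (by omega)
        (by rw [show (i+1)-1 = i by omega, hdrop', hbp]) hlen
        (by intro j hj; exact hagree j (by omega)) hk0 (by push_cast; omega)
      push_cast at hstep' ⊢
      rw [hstep']
      simp [pvGroupsGo]
    · have hbeq : (b == prev) = false := by simp [hbp]
      simp only [hbeq, Bool.false_eq_true, if_false]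
      have hagree' : ∀ j : Nat, (i + 1) - 1 ≤ j → (l.set k.toNat b).getD j 0 = orig.getD j 0 := by
        intro j hj
        have hj' : i ≤ j := by omega
        by_cases hkj : k.toNat = j
        · have hkeq : k.toNat = i := by omega
          have hjl : k.toNat < l.length := by omega
          subst hkj
          rw [List.getD, List.getElem?_set]
          simp only [hjl, if_true]
          rw [hkeq]
          simpa [List.getD] using hb.symm
        · rw [List.getD, List.getElem?_set_ne hkj, ← List.getD]
          exact hagree j (by omega)
      have hstep' := ih b orig (l.set k.toNat b) (i + 1) (k + 1) (by omega)
        (by simpa using hdrop') (by simpa using hlen)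
        hagree' (by omega) (by push_cast; omega)
      push_cast at hstep' ⊢
      rw [hstep']
      simp [pvGroupsGo, hbp]
      ring

-- A's whole loop computes the number of runs
theorem pvA_eq_groups (orig : List Int) :
    ((PySem.List.pyRange 0 (orig.length : Int) 1).foldl pvStepA (orig, 0)).2
      = pvGroups orig := by
  cases orig with
  | nil => simp [pvGroups, PySem.List.pyRange_one_eq_nil]
  | cons a rest =>
    rw [PySem.List.pyRange_one_cons (by exact_mod_cast Nat.succ_pos rest.length : (0 : Int) < ((a :: rest).length : Int))]
    rw [List.foldl_cons]
    have hstep : pvStepA (a :: rest, 0) 0 = (a :: rest, 1) := by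
      unfold pvStepA
      rw [PySem.List.pySetD_of_nonneg _ _ (le_refl (0:Int))]
      simp [PySem.List.pyGetD_zero_cons]
    rw [hstep]
    have := pvA_loop rest a (a :: rest) (a :: rest) 1 1 (le_refl 1)
      (by simp) rfl (by intro j _; rfl) (by omega) (by omega)
    simpa [pvGroups] using this

-- pvGroupsGo over an append splits at the last element of the left part
theorem pvGo_append (xs : List Int) : ∀ (prev : Int) (ys : List Int),
    pvGroupsGo prev (xs ++ ys) = pvGroupsGo prev xs + pvGroupsGo (pvLastD prev xs) ys := by
  induction xs with
  | nil => intro prev ys; simp [pvGroupsGo, pvLastD]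
  | cons b rest ih =>
    intro prev ys
    simp only [List.cons_append, pvGroupsGo, pvLastD, ih]
    ring

-- run count of a concatenation of two nonempty lists
theorem pvGroups_append (a : Int) (xs : List Int) (c : Int) (ys : List Int) :
    pvGroups ((a :: xs) ++ (c :: ys))
      = pvGroups (a :: xs) + pvGroups (c :: ys)
        - (if pvLastD a xs == c then 1 else 0) := by
  simp only [List.cons_append, pvGroups, pvGo_append, pvGroupsGo]
  by_cases h : c = pvLastD a xs
  · simp [h]; ring
  · have h1 : (c == pvLastD a xs) = false := by simp [h]
    have h2 : (pvLastD a xs == c) = false := by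
      simp only [beq_eq_false_iff_ne, ne_eq]
      exact fun e => h e.symm
    simp [h1, h2]; ring

-- pvLastD of prev :: xs is getD at the last position
theorem pvLastD_getD (xs : List Int) : ∀ (prev : Int),
    pvLastD prev xs = (prev :: xs).getD xs.length 0 := by
  induction xs with
  | nil => intro prev; rfl
  | cons b rest ih => intro prev; simpa [pvLastD, List.getD] using ih b

-- unfolding of pvRuns in the recursive case
theorem pvRuns_unfold (a : List Int) (lo hi : Nat) (h : ¬ hi - lo ≤ 1) :
    pvRuns a lo hi =
      (if a.getD ((lo + hi) / 2 - 1) 0 == a.getD ((lo + hi) / 2) 0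
       then pvRuns a lo ((lo + hi) / 2) + pvRuns a ((lo + hi) / 2) hi - 1
       else pvRuns a lo ((lo + hi) / 2) + pvRuns a ((lo + hi) / 2) hi) := by
  rw [pvRuns]
  simp [h]

-- B's divide-and-conquer equals pvGroups on the slice a[lo:hi)
theorem pvRuns_eq_groups (n : Nat) : ∀ (a : List Int) (lo hi : Nat),
    hi - lo ≤ n → lo ≤ hi → hi ≤ a.length →
    pvRuns a lo hi = pvGroups ((a.drop lo).take (hi - lo)) := by
  induction n with
  | zero =>
    intro a lo hi hn hlh hha
    have h0 : hi - lo = 0 := by omega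
    rw [pvRuns, if_pos (by omega), h0]
    simp [pvGroups]
  | succ n ih =>
    intro a lo hi hn hlh hha
    by_cases hsmall : hi - lo ≤ 1
    · rw [pvRuns, if_pos hsmall]
      by_cases h0 : hi = lo
      · simp [h0, pvGroups]
      · have h1 : hi - lo = 1 := by omega
        have hlo : lo < a.length := by omega
        have hd : (a.drop lo).take 1 = [a[lo]] := by
          rw [List.drop_eq_getElem_cons hlo, List.take_succ_cons, List.take_zero]
        rw [h1, hd]
        simp [pvGroups, pvGroupsGo]
    · rw [pvRuns_unfold a lo hi hsmall]
      set mid := (lo + hi) / 2 with hmid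
      clear_value mid
      have hlm : lo < mid := by omega
      have hmh : mid < hi := by omega
      have hL := ih a lo mid (by omega) (by omega) (by omega)
      have hR := ih a mid hi (by omega) (by omega) hha
      -- split the slice at mid
      have hsplit : (a.drop lo).take (hi - lo)
          = (a.drop lo).take (mid - lo) ++ (a.drop mid).take (hi - mid) := by
        rw [show hi - lo = (mid - lo) + (hi - mid) by omega, List.take_add]
        congr 1
        rw [List.drop_drop, show lo + (mid - lo) = mid from by omega]
      have hLlen : ((a.drop lo).take (mid - lo)).length = mid - lo := by
        simp [List.length_take, List.length_drop]; omega
      have hRlen : ((a.drop mid).take (hi - mid)).length = hi - mid := by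
        simp [List.length_take, List.length_drop]; omega
      obtain ⟨u, us, hu⟩ : ∃ u us, (a.drop lo).take (mid - lo) = u :: us := by
        cases h : (a.drop lo).take (mid - lo) with
        | nil => rw [h] at hLlen; simp at hLlen; omega
        | cons u us => exact ⟨u, us, rfl⟩
      obtain ⟨c, cs, hc⟩ : ∃ c cs, (a.drop mid).take (hi - mid) = c :: cs := by
        cases h : (a.drop mid).take (hi - mid) with
        | nil => rw [h] at hRlen; simp at hRlen; omega
        | cons c cs => exact ⟨c, cs, rfl⟩
      -- the boundary elements
      have hclast : pvLastD u us = a.getD (mid - 1) 0 := by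
        rw [pvLastD_getD, ← hu]
        have hus : us.length = mid - lo - 1 := by
          rw [hu] at hLlen; simp at hLlen; omega
        rw [hus]
        have hidx : mid - lo - 1 < ((a.drop lo).take (mid - lo)).length := by omega
        rw [List.getD, List.getElem?_eq_getElem hidx]
        rw [List.getD]
        have hidx2 : mid - 1 < a.length := by omega
        rw [List.getElem?_eq_getElem hidx2]
        simp only [Option.getD_some]
        rw [List.getElem_take, List.getElem_drop]
        congr 1
        omega
      have hchead : c = a.getD mid 0 := by
        have hidx : 0 < ((a.drop mid).take (hi - mid)).length := by omega
        have h0 : ((a.drop mid).take (hi - mid))[0]'hidx = c := by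
          simp [hc]
        rw [List.getElem_take, List.getElem_drop] at h0
        have hmlen : mid < a.length := by omega
        rw [List.getD, List.getElem?_eq_getElem hmlen]
        simpa using h0.symm
      rw [hL, hR, hsplit, hu, hc, pvGroups_append, hclast, hchead]
      simp only [beq_iff_eq]
      split_ifs with hbd
      · rfl
      · simp

-- ===== VERDICT (by name: the statement is the Claim_ definition above) =====
theorem sol_1_spec : Claim_equal_sol_1 := by
  intro y _ _
  unfold Spec_sol_1 sol_1 sol_1_alt
  simp only []
  set nums : List Int := (PySem.Str.split₀ y).map (fun t => (PySem.Int.ofStr? t).getD 0)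
  rw [pvA_eq_groups, pvRuns_eq_groups nums.length nums 0 nums.length (by omega) (by omega) (le_refl _)]
  simp
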